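-- pv_equiv track=rewrite | github.com/DeepLatte/coding_test | heaq-1.py | solution
-- ===== SOURCE A (Python) =====
-- import heapq
--
-- def solution(scoville, K):
--     heapq.heapify(scoville)   # Using heapify, heapq is generated from list.
--     answer = 0
--     while 1:
--         if scoville[0] > K:   # heap[0] returns the smallest element. notice! heap[1] doesn't return smallest element.
--             break
--         if len(scoville) is 1:
--             return -1
--         A = heapq.heappop(scoville)    # pop
--         B = heapq.heappop(scoville)
--         new_K = A + B*2
--         heapq.heappush(scoville, new_K) # push
--         answer += 1
--
--     return answer
-- ===== SOURCE B (Python) =====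
-- def solution(scoville, K):
--     s = sorted(scoville)
--     answer = 0
--     while s and s[0] <= K:
--         if len(s) == 1:
--             return -1
--         a = s[0]
--         b = s[1]
--         s = s[2:]
--         n = a + b * 2
--         i = 0
--         while i < len(s) and s[i] < n:
--             i += 1
--         s.insert(i, n)
--         answer += 1
--     return answer
-- ===== Notes on version B (the rewrite author's own statement) =====
-- stated objective: alternative
-- what changed: Replaces the binary heap with one initial sort plus ordered re-insertion of each mixed value into a plain sorted list by linear scan.
import Mathlib
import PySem

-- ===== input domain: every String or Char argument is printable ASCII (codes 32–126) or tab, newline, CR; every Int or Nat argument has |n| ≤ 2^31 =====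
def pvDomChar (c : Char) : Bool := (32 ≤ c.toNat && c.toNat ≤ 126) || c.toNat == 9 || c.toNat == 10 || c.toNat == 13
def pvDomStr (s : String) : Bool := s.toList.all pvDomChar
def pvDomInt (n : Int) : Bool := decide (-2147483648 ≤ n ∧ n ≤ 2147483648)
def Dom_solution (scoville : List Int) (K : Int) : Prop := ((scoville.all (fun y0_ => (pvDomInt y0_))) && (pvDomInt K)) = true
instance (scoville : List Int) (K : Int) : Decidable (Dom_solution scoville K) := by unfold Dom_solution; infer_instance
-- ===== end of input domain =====

-- B replaces the heap with one initial sort plus ordered linear-scan re-insertion; equivalence is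
-- about the RETURN value only (Python A heapifies its argument list in place, B does not mutate it).

-- ===== PORT A =====
-- The heapq primitives are ported by their observable priority-queue contract, which is exact for
-- the returned value: heap[0] and heappop give the minimum value of the heap's multiset, heappop
-- removes one occurrence of it, heappush adds an element. (The concrete array layout of CPython's
-- binary heap never influences A's return value, which depends only on the multiset of values.)
def solutionGo (bag : List Int) (K answer : Int) : Int :=
  match hm : PySem.List.min? bag (fun x => x) with
  | none => answer            -- empty heap: Python's scoville[0] raises IndexError (outside Pre_)
  | some A =>
    if A > K then answer
    else if bag.length = 1 then -1
    else
      match hm2 : PySem.List.min? (bag.erase A) (fun x => x) with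
      | none => answer        -- unreachable: the heap has at least two elements here
      | some B => solutionGo ((bag.erase A).erase B ++ [A + B * 2]) K (answer + 1)
termination_by bag.length
decreasing_by
  have h1 : A ∈ bag := PySem.List.min?_mem hm
  have h2 : B ∈ bag.erase A := PySem.List.min?_mem hm2
  have l1 := List.length_erase_of_mem h1
  have l2 := List.length_erase_of_mem h2
  have hp : 1 ≤ bag.length := List.length_pos_of_mem h1
  simp only [List.length_append, List.length_cons, List.length_nil, l1, l2]
  omega

def solution (scoville : List Int) (K : Int) : Int :=
  solutionGo scoville K 0

-- ===== PORT B =====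
-- the inner while loop of B: scan past smaller elements, insert n at the first position ≥ n
def insScan (n : Int) : List Int → List Int
  | [] => [n]
  | x :: xs => if x < n then x :: insScan n xs else n :: x :: xs

-- cited by sortedGo's termination proof
theorem insScan_length (n : Int) (l : List Int) : (insScan n l).length = l.length + 1 := by
  induction l with
  | nil => rfl
  | cons x xs ih => simp only [insScan]; split <;> simp [ih]

def sortedGo (s : List Int) (K answer : Int) : Int :=
  match s with
  | [] => answer
  | a :: rest =>
    if a > K then answer
    else
      match rest with
      | [] => -1
      | b :: rest' => sortedGo (insScan (a + b * 2) rest') K (answer + 1)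
termination_by s.length
decreasing_by
  simp only [List.length_cons]
  have := insScan_length (a + b * 2) rest'
  omega

def solution_alt (scoville : List Int) (K : Int) : Int :=
  sortedGo (PySem.List.sorted scoville (fun x => x) false) K 0

-- ===== PRECONDITION & SPEC =====
-- Pre_ excludes only the empty list, on which Python A raises IndexError (scoville[0] of an empty heap).
def Pre_solution (scoville : List Int) (K : Int) : Prop := scoville ≠ []
instance (scoville : List Int) (K : Int) : Decidable (Pre_solution scoville K) := by unfold Pre_solution; infer_instance
def pvWitness_solution : List Int × Int := ([1, 2, 9], 10)

def Spec_solution (scoville : List Int) (K : Int) (out : Int) : Prop := out = solution_alt scoville K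
instance (scoville : List Int) (K : Int) (out : Int) : Decidable (Spec_solution scoville K out) := by unfold Spec_solution; infer_instance

-- ===== CLAIM (what is proved, stated in full; the proofs are below) =====
def Claim_equal_solution : Prop := ∀ (scoville : List Int) (K : Int), Dom_solution scoville K → Pre_solution scoville K → Spec_solution scoville K (solution scoville K)

-- ===== LEMMAS AND PROOFS =====

-- the head of sorted(l) is the minimum value, i.e. exactly what A's heap root / heappop yields
theorem min?_of_sorted_cons {l : List Int} {a : Int} {t : List Int}
    (hs : PySem.List.sorted l (fun x => x) false = a :: t) :
    PySem.List.min? l (fun x => x) = some a := by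
  have hne : l ≠ [] := by
    intro h
    subst h
    rw [(PySem.List.sorted_eq_nil_iff ([] : List Int) (fun x => x) false).mpr rfl] at hs
    cases hs
  cases hmin : PySem.List.min? l (fun x => x) with
  | none => exact absurd ((PySem.List.min?_eq_none_iff l (fun x => x)).mp hmin) hne
  | some m =>
    have hm : m ∈ l := PySem.List.min?_mem hmin
    have ha : a ∈ l := by
      have : a ∈ PySem.List.sorted l (fun x => x) false := by rw [hs]; exact List.mem_cons_self
      exact (PySem.List.mem_sorted l (fun x => x) false a).mp this
    have h1 : m ≤ a := PySem.List.min?_isMin hmin a ha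
    have h2 : a ≤ m := PySem.List.key_head_sorted_le l (fun x => x) hs m hm
    exact congrArg some (le_antisymm h1 h2)

-- removing one occurrence of the minimum value drops the head of the sorted view
theorem sorted_erase_head {l : List Int} {a : Int} {t : List Int}
    (hs : PySem.List.sorted l (fun x => x) false = a :: t) :
    PySem.List.sorted (l.erase a) (fun x => x) false = t := by
  have ha : a ∈ l := by
    have : a ∈ PySem.List.sorted l (fun x => x) false := by rw [hs]; exact List.mem_cons_self
    exact (PySem.List.mem_sorted l (fun x => x) false a).mp this
  have hperm : (a :: t).Perm l := by rw [← hs]; exact PySem.List.sorted_perm l (fun x => x) false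
  have hperm2 : l.Perm (a :: l.erase a) := List.perm_cons_erase ha
  have ht : t.Perm (l.erase a) := ((hperm.trans hperm2).cons_inv)
  have hpw : t.Pairwise (fun x y : Int => x ≤ y) := by
    have := PySem.List.sorted_pairwise l (fun x : Int => x)
    rw [hs] at this
    exact this.tail
  exact PySem.List.sorted_id_eq_of_perm_of_pairwise _ _ ht hpw

theorem insScan_perm (v : Int) (l : List Int) : (insScan v l).Perm (v :: l) := by
  induction l with
  | nil => simp [insScan]
  | cons x xs ih =>
    simp only [insScan]
    split
    · exact (ih.cons x).trans (List.Perm.swap v x xs)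
    · exact List.Perm.refl _

theorem insScan_pairwise {l : List Int} (v : Int)
    (h : l.Pairwise (fun x y : Int => x ≤ y)) :
    (insScan v l).Pairwise (fun x y : Int => x ≤ y) := by
  induction l with
  | nil => simp [insScan]
  | cons x xs ih =>
    rw [List.pairwise_cons] at h
    simp only [insScan]
    split
    · rename_i hlt
      rw [List.pairwise_cons]
      refine ⟨?_, ih h.2⟩
      intro y hy
      have : y = v ∨ y ∈ xs := by
        have := (insScan_perm v xs).mem_iff.mp hy
        simpa using this
      rcases this with rfl | hmem
      · omega
      · exact h.1 y hmem
    · rename_i hge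
      rw [List.pairwise_cons]
      refine ⟨?_, List.pairwise_cons.mpr h⟩
      intro y hy
      rcases List.mem_cons.mp hy with rfl | hmem
      · omega
      · have := h.1 y hmem; omega

-- unfolding lemmas for the two worker loops
theorem solutionGo_none {bag : List Int} {K answer : Int}
    (h : PySem.List.min? bag (fun x => x) = none) : solutionGo bag K answer = answer := by
  rw [solutionGo.eq_def]
  split
  · rfl
  · rename_i A hA; rw [h] at hA; cases hA

theorem solutionGo_break {bag : List Int} {K answer A : Int}
    (h : PySem.List.min? bag (fun x => x) = some A) (hK : A > K) :
    solutionGo bag K answer = answer := by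
  rw [solutionGo.eq_def]
  split
  · rfl
  · rename_i A' hA'
    rw [h] at hA'
    injection hA' with hA'
    subst hA'
    simp [hK]

theorem solutionGo_one {bag : List Int} {K answer A : Int}
    (h : PySem.List.min? bag (fun x => x) = some A) (hK : ¬ A > K) (hl : bag.length = 1) :
    solutionGo bag K answer = -1 := by
  rw [solutionGo.eq_def]
  split
  · rename_i hA; rw [h] at hA; cases hA
  · rename_i A' hA'
    rw [h] at hA'
    injection hA' with hA'
    subst hA'
    simp [hK, hl]

theorem solutionGo_step {bag : List Int} {K answer A B : Int}
    (h : PySem.List.min? bag (fun x => x) = some A) (hK : ¬ A > K) (hl : ¬ bag.length = 1)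
    (h2 : PySem.List.min? (bag.erase A) (fun x => x) = some B) :
    solutionGo bag K answer = solutionGo ((bag.erase A).erase B ++ [A + B * 2]) K (answer + 1) := by
  rw [solutionGo.eq_def]
  split
  · rename_i hA; rw [h] at hA; cases hA
  · rename_i A' hA'
    rw [h] at hA'
    injection hA' with hA'
    subst hA'
    simp only [hK, if_false, hl]
    split
    · rename_i hB; rw [h2] at hB; cases hB
    · rename_i B' hB'
      rw [h2] at hB'
      injection hB' with hB'
      subst hB'
      rfl

theorem sortedGo_nil (K answer : Int) : sortedGo [] K answer = answer := by
  rw [sortedGo.eq_def]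

theorem sortedGo_one (a K answer : Int) :
    sortedGo [a] K answer = if a > K then answer else -1 := by
  rw [sortedGo.eq_def]

theorem sortedGo_cons₂ (a b : Int) (r : List Int) (K answer : Int) :
    sortedGo (a :: b :: r) K answer =
      if a > K then answer else sortedGo (insScan (a + b * 2) r) K (answer + 1) := by
  rw [sortedGo.eq_def]

theorem solutionGo_eq_sortedGo (n : Nat) :
    ∀ (bag : List Int), bag.length = n → ∀ (K answer : Int),
      solutionGo bag K answer = sortedGo (PySem.List.sorted bag (fun x => x) false) K answer := by
  induction n using Nat.strong_induction_on with
  | _ n ih =>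
    intro bag hlen K answer
    cases hs : PySem.List.sorted bag (fun x => x) false with
    | nil =>
      have hb : bag = [] := (PySem.List.sorted_eq_nil_iff bag (fun x => x) false).mp hs
      subst hb
      rw [sortedGo_nil, solutionGo_none ((PySem.List.min?_eq_none_iff _ _).mpr rfl)]
    | cons a t =>
      have hmin : PySem.List.min? bag (fun x => x) = some a := min?_of_sorted_cons hs
      have hlen_sorted : bag.length = t.length + 1 := by
        have := (PySem.List.sorted_perm bag (fun x : Int => x) false).length_eq
        rw [hs] at this; simpa using this.symm
      by_cases hK : a > K
      · rw [solutionGo_break hmin hK]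
        cases t with
        | nil => rw [sortedGo_one]; simp [hK]
        | cons b t' => rw [sortedGo_cons₂]; simp [hK]
      · cases t with
        | nil =>
          rw [solutionGo_one hmin hK (by simpa using hlen_sorted), sortedGo_one]
          simp [hK]
        | cons b t' =>
          have hne1 : ¬ bag.length = 1 := by simp at hlen_sorted; omega
          have hs1 : PySem.List.sorted (bag.erase a) (fun x => x) false = b :: t' :=
            sorted_erase_head hs
          have hmin2 : PySem.List.min? (bag.erase a) (fun x => x) = some b :=
            min?_of_sorted_cons hs1
          have hs2 : PySem.List.sorted ((bag.erase a).erase b) (fun x => x) false = t' :=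
            sorted_erase_head hs1
          -- the new bag sorts to exactly B's scan-inserted list
          have hins : PySem.List.sorted ((bag.erase a).erase b ++ [a + b * 2]) (fun x => x) false
              = insScan (a + b * 2) t' := by
            have hpw : t'.Pairwise (fun x y : Int => x ≤ y) := by
              have := PySem.List.sorted_pairwise bag (fun x : Int => x)
              rw [hs] at this
              exact this.tail.tail
            have hp1 : ((bag.erase a).erase b).Perm t' := by
              have := PySem.List.sorted_perm ((bag.erase a).erase b) (fun x : Int => x) false
              rw [hs2] at this; exact this.symm
            have hperm : (insScan (a + b * 2) t').Perm ((bag.erase a).erase b ++ [a + b * 2]) := by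
              refine (insScan_perm _ _).trans ?_
              refine List.Perm.trans ?_ (List.perm_append_singleton _ _).symm
              exact (hp1.symm).cons _
            exact PySem.List.sorted_id_eq_of_perm_of_pairwise _ _ hperm (insScan_pairwise _ hpw)
          have hlen' : ((bag.erase a).erase b ++ [a + b * 2]).length < n := by
            have ha : a ∈ bag := PySem.List.min?_mem hmin
            have hb : b ∈ bag.erase a := PySem.List.min?_mem hmin2
            have l1 := List.length_erase_of_mem ha
            have l2 := List.length_erase_of_mem hb
            simp only [List.length_append, List.length_cons, List.length_nil, l1, l2]
            omega
          rw [solutionGo_step hmin hK hne1 hmin2, sortedGo_cons₂,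
            ih _ hlen' _ rfl K (answer + 1), hins]
          simp [hK]

-- ===== VERDICT (by name: the statement is the Claim_ definition above) =====
theorem solution_spec : Claim_equal_solution := by
  intro scoville K _ _
  unfold Spec_solution solution solution_alt
  exact solutionGo_eq_sortedGo scoville.length scoville rfl K 0
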